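-- pv_equiv track=rewrite | github.com/JJong-Min/Programmers-Alogorithm | Level1/약수의 개수와 덧셈.py | is_divisor
-- ===== SOURCE A (Python) =====
-- def is_divisor(num):
--     ans = 0
--     for i in range(1, num+1):
--         if num%i == 0:
--             ans += 1
--     if ans%2 == 0:
--         return True
--     else:
--         return False
-- ===== SOURCE B (Python) =====
-- def is_divisor(num):
--     # A number >= 1 has an even number of divisors iff it is not a perfect
--     # square; find the smallest i >= 1 with i*i >= num in O(sqrt(num)) steps.
--     i = 1
--     while i * i < num:
--         i += 1
--     return i * i != num
-- ===== Notes on version B (the rewrite author's own statement) =====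
-- stated objective: faster
-- what changed: Replaces the O(n) divisor-counting loop with an O(sqrt(n)) scan for the integer square root: a count of divisors is even exactly when num is not a perfect square.
import Mathlib
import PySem

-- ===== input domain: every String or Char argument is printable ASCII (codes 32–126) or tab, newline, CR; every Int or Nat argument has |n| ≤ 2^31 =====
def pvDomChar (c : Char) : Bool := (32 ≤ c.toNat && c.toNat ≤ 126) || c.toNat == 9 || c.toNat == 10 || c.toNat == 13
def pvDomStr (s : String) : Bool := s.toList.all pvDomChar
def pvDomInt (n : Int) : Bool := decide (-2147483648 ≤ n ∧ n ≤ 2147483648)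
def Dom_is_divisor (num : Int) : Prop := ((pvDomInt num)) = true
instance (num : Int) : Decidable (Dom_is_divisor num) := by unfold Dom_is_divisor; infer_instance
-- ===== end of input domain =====

-- B replaces A's O(num) divisor-counting loop by an O(√num) search for the least
-- i ≥ 1 with i*i ≥ num: the divisor count is even iff num is not a perfect square.

-- ===== PORT A =====
def is_divisor (num : Int) : Bool :=
  let ans : Int :=
    (PySem.List.pyRange 1 (num + 1) 1).foldl
      (fun ans i => if PySem.Int.mod num i = 0 then ans + 1 else ans) 0
  if PySem.Int.mod ans 2 = 0 then true else false

-- ===== PORT B =====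
-- the 'while i * i < num: i += 1' loop of Source B
def isDivisorAltLoop (num i : Int) : Int :=
  if i * i < num then isDivisorAltLoop num (i + 1) else i
termination_by (num - i).toNat
decreasing_by
  have hlt : i < num := by
    by_cases h0 : i ≤ 0
    · have := mul_self_nonneg i; linarith
    · have h1 : 0 < i := by omega
      have h2 : i * 1 ≤ i * i := mul_le_mul_of_nonneg_left h1 (by linarith)
      linarith
  omega

def is_divisor_alt (num : Int) : Bool :=
  let i := isDivisorAltLoop num 1
  decide (i * i ≠ num)

-- ===== PRECONDITION & SPEC =====
def Spec_is_divisor (num : Int) (out : Bool) : Prop := out = is_divisor_alt num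
instance (num : Int) (out : Bool) : Decidable (Spec_is_divisor num out) := by unfold Spec_is_divisor; infer_instance

-- ===== CLAIM (what is proved, stated in full; the proofs are below) =====
def Claim_equal_is_divisor : Prop := ∀ (num : Int), Dom_is_divisor num → Spec_is_divisor num (is_divisor num)

-- ===== LEMMAS AND PROOFS =====

-- The loop of B returns the least i' ≥ i with i'*i' ≥ num, so its square hits num
-- exactly when num has a square root ≥ i.
theorem isDivisorAltLoop_sq_iff (num i : Int) (hi : 1 ≤ i) :
    isDivisorAltLoop num i * isDivisorAltLoop num i = num ↔ ∃ m : Int, i ≤ m ∧ m * m = num := by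
  induction i using isDivisorAltLoop.induct (num := num) with
  | case1 i h ih =>
    rw [isDivisorAltLoop, if_pos h]
    rw [ih (by linarith)]
    constructor
    · rintro ⟨m, hm, rfl⟩; exact ⟨m, by linarith, rfl⟩
    · rintro ⟨m, hm, rfl⟩
      refine ⟨m, ?_, rfl⟩
      rcases eq_or_lt_of_le hm with rfl | hlt
      · exact absurd h (lt_irrefl _)
      · linarith
  | case2 i h =>
    rw [isDivisorAltLoop, if_neg h]
    push Not at h
    constructor
    · intro he; exact ⟨i, le_refl i, he⟩
    · rintro ⟨m, hm, rfl⟩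
      have : i * i ≤ m * m := mul_le_mul hm hm (by linarith) (by linarith)
      nlinarith

theorem isSquare_iff_even_factorization (n : ℕ) (hn : n ≠ 0) :
    IsSquare n ↔ ∀ p, Even (n.factorization p) := by
  constructor
  · rintro ⟨r, rfl⟩ p
    have hr : r ≠ 0 := by rintro rfl; simp at hn
    rw [Nat.factorization_mul hr hr]
    exact ⟨r.factorization p, rfl⟩
  · intro h
    have h2 : Nat.floorRoot 2 n ≠ 0 := Nat.floorRoot_ne_zero.2 ⟨two_ne_zero, hn⟩
    refine ⟨Nat.floorRoot 2 n, (Nat.eq_of_factorization_eq hn (Nat.mul_ne_zero h2 h2) fun p => ?_)⟩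
    rw [Nat.factorization_mul h2 h2, Finsupp.add_apply, Nat.factorization_floorRoot,
      Finsupp.floorDiv_apply, Nat.floorDiv_eq_div]
    obtain ⟨k, hk⟩ := h p
    omega

theorem odd_card_divisors_iff (n : ℕ) (hn : n ≠ 0) :
    Odd n.divisors.card ↔ IsSquare n := by
  rw [Nat.card_divisors hn, isSquare_iff_even_factorization n hn,
    ← Nat.not_even_iff_odd, even_iff_two_dvd,
    Nat.Prime.prime Nat.prime_two |>.dvd_finset_prod_iff _]
  push Not
  constructor
  · intro hall p
    by_cases hp : p ∈ n.primeFactors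
    · have h2 := hall p hp
      rcases Nat.even_or_odd (n.factorization p) with he | ho
      · exact he
      · obtain ⟨k, hk⟩ := ho
        exact absurd ⟨k + 1, by omega⟩ h2
    · have h0 : n.factorization p = 0 := by
        rwa [← Finsupp.notMem_support_iff, Nat.support_factorization]
      simp [h0]
  · intro hall p _
    obtain ⟨k, hk⟩ := hall p
    exact fun ⟨m, hm⟩ => by omega

theorem card_divisors_eq_filter_range (n : ℕ) (hn : n ≠ 0) :
    n.divisors.card = ((Finset.range n).filter (fun k => (k + 1) ∣ n)).card := by
  rw [Nat.divisors]
  apply Finset.card_nbij' (fun m => m - 1) (fun k => k + 1)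
  · intro m hm
    simp only [Finset.mem_coe, Finset.mem_filter, Finset.mem_Ico] at hm
    simp only [Finset.mem_coe, Finset.mem_filter, Finset.mem_range]
    obtain ⟨⟨h1, h2⟩, h3⟩ := hm
    have he : m - 1 + 1 = m := by omega
    exact ⟨by omega, by rw [he]; exact h3⟩
  · intro k hk
    simp only [Finset.mem_coe, Finset.mem_filter, Finset.mem_range] at hk
    simp only [Finset.mem_coe, Finset.mem_filter, Finset.mem_Ico]
    have hle := Nat.le_of_dvd (Nat.pos_of_ne_zero hn) hk.2
    exact ⟨⟨by omega, by omega⟩, hk.2⟩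
  · intro m hm
    simp only [Finset.mem_coe, Finset.mem_filter, Finset.mem_Ico] at hm
    show m - 1 + 1 = m
    omega
  · intro k hk
    show k + 1 - 1 = k
    omega

theorem countP_range_eq_card_filter (N : ℕ) (q : ℕ → Bool) :
    (List.range N).countP q = ((Finset.range N).filter (fun k => q k)).card := by
  induction N with
  | zero => rfl
  | succ n ih =>
    rw [List.range_succ, Finset.range_add_one, List.countP_append, Finset.filter_insert]
    split_ifs with h <;> simp [Finset.card_insert_of_notMem, ih, h]

-- A's loop counts exactly the divisors of num when num ≥ 1.
theorem is_divisor_count (num : Int) (h1 : 1 ≤ num) :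
    (PySem.List.pyRange 1 (num + 1) 1).foldl
      (fun ans i => if PySem.Int.mod num i = 0 then ans + 1 else ans) 0
    = (num.toNat.divisors.card : Int) := by
  rw [PySem.List.foldl_ite_add_one, PySem.List.pyRange_one, List.countP_map]
  have hnum : ((num.toNat : Int)) = num := Int.toNat_of_nonneg (by linarith)
  have hN : (num + 1 - 1).toNat = num.toNat := by omega
  rw [hN, zero_add]
  have hq : ∀ k ∈ List.range num.toNat,
      (((fun x => decide (PySem.Int.mod num x = 0)) ∘ fun k : ℕ => 1 + (k : Int)) k = true
        ↔ (fun k => decide ((k + 1) ∣ num.toNat)) k = true) := by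
    intro k _
    simp only [Function.comp_apply, decide_eq_true_eq]
    rw [PySem.Int.mod_eq_zero_iff_dvd]
    rw [show (1 + (k : Int)) = ((k + 1 : ℕ) : Int) by push_cast; ring, ← hnum]
    exact Int.natCast_dvd_natCast
  rw [List.countP_congr hq, countP_range_eq_card_filter,
    card_divisors_eq_filter_range num.toNat (by omega)]
  norm_num

-- B's result compared with num is exactly "num is a perfect square" for num ≥ 1.
theorem alt_sq_iff_isSquare (num : Int) (h1 : 1 ≤ num) :
    (isDivisorAltLoop num 1 * isDivisorAltLoop num 1 = num) ↔ IsSquare num.toNat := by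
  rw [isDivisorAltLoop_sq_iff num 1 le_rfl]
  constructor
  · rintro ⟨m, hm, hmm⟩
    refine ⟨m.toNat, ?_⟩
    have hmn : ((m.toNat : Int)) = m := Int.toNat_of_nonneg (by linarith)
    have hcast : ((num.toNat : Int)) = ((m.toNat : Int)) * ((m.toNat : Int)) := by
      rw [hmn, hmm, Int.toNat_of_nonneg (by linarith)]
    exact_mod_cast hcast
  · rintro ⟨r, hr⟩
    refine ⟨(r : Int), ?_, ?_⟩
    · have : r ≠ 0 := by rintro rfl; omega
      exact_mod_cast Nat.one_le_iff_ne_zero.2 this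
    · have : ((num.toNat : Int)) = num := Int.toNat_of_nonneg (by linarith)
      omega

-- ===== VERDICT (by name: the statement is the Claim_ definition above) =====
theorem is_divisor_spec : Claim_equal_is_divisor := by
  intro num _
  unfold Spec_is_divisor is_divisor is_divisor_alt
  rcases le_or_gt num 0 with hle | hpos
  · -- no iterations: A returns True; B's loop stops at i = 1 and 1 ≠ num
    have hloop : isDivisorAltLoop num 1 = 1 := by
      rw [isDivisorAltLoop, if_neg (by norm_num; omega)]
    rw [PySem.List.pyRange_one_eq_nil (by omega), hloop]
    simp only [List.foldl_nil, one_mul]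
    rw [if_pos (by decide)]
    simp only [true_eq_decide_iff]
    omega
  · have h1 : 1 ≤ num := hpos
    have hn0 : num.toNat ≠ 0 := by omega
    simp only [is_divisor_count num h1]
    rw [Bool.eq_iff_iff]
    have hmod : PySem.Int.mod ((num.toNat.divisors.card : Nat) : Int) 2
        = (((num.toNat.divisors.card : Nat) % 2 : Nat) : Int) := PySem.Int.mod_natCast _ _
    constructor
    · intro hA
      split_ifs at hA with h
      · rw [decide_eq_true_eq]
        intro hsq
        have : IsSquare num.toNat := (alt_sq_iff_isSquare num h1).1 hsq
        have hodd : Odd num.toNat.divisors.card := (odd_card_divisors_iff _ hn0).2 this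
        rw [hmod] at h
        obtain ⟨k, hk⟩ := hodd
        omega
    · intro hB
      rw [decide_eq_true_eq] at hB
      have hnsq : ¬ IsSquare num.toNat := fun hs =>
        hB ((alt_sq_iff_isSquare num h1).2 hs)
      have hnodd : ¬ Odd num.toNat.divisors.card := fun ho =>
        hnsq ((odd_card_divisors_iff _ hn0).1 ho)
      rw [Nat.not_odd_iff_even] at hnodd
      obtain ⟨k, hk⟩ := hnodd
      rw [if_pos]
      rw [hmod]
      omega
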